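-- pv_equiv track=rewrite | github.com/amruthsrepo/Practice_programs | Coding rounds/zipRecruiter/9_8_24_1/2.py | find_last_round_trip
-- ===== SOURCE A (Python) =====
-- def find_last_round_trip(trips, a2b, b2a):
--     ct = 0
--
--     for _ in range(trips):
--         for ab in a2b:
--             if ab >= ct:
--                 break
--
--         ct = ab + 100
--
--         for ba in b2a:
--             if ba >= ct:
--                 break
--
--         ct = ba + 100
--
--     return ct
-- ===== SOURCE B (Python) =====
-- def find_last_round_trip(trips, a2b, b2a):
--     # Cycle detection: ct after each trip comes from a finite set, so the
--     # sequence of ct values is eventually periodic; once a value repeats we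
--     # skip the remaining trips with modular arithmetic.
--     def step(ct):
--         ab = next((x for x in a2b if x >= ct), a2b[-1])
--         ct = ab + 100
--         ba = next((x for x in b2a if x >= ct), b2a[-1])
--         return ba + 100
--
--     ct = 0
--     seen = {}
--     t = 0
--     while t < trips:
--         if ct in seen:
--             cycle = t - seen[ct]
--             rem = (trips - t) % cycle
--             for _ in range(rem):
--                 ct = step(ct)
--             return ct
--         seen[ct] = t
--         ct = step(ct)
--         t += 1
--     return ct
-- ===== Notes on version B (the rewrite author's own statement) =====
-- stated objective: faster
-- what changed: B replaces A's plain trips-fold simulation by cycle detection: it memoises each ct value with its trip index in a dict and, on the first repeat, skips the remaining trips with modular arithmetic, so the running time no longer grows with trips.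
import Mathlib
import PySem

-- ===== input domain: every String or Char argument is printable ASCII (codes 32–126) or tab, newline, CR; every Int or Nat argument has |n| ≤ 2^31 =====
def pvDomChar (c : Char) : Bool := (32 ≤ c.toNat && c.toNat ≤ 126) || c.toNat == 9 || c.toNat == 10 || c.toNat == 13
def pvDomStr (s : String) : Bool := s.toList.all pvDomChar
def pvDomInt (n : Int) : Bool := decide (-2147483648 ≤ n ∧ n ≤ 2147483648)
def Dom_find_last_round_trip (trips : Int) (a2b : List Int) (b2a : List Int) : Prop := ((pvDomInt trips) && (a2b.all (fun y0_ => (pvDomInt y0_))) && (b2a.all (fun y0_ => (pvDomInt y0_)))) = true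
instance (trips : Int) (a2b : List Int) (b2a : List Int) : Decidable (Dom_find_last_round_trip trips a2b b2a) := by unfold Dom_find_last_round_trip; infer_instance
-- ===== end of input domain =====

-- B detects the cycle in the ct sequence and skips ahead with modular arithmetic
-- instead of simulating all `trips` rounds; measurably faster for large trips.

-- ===== PORT A =====
-- `for v in xs: if v >= ct: break` leaves v = first element ≥ ct, else the last
-- element; we carry the leftover loop variable as an Option (none = unassigned;
-- Python raises NameError then, excluded by Pre_, port uses .getD 0 there).
def pvScanA (ct : Int) : List Int → Option Int → Option Int
  | [], cur => cur
  | x :: rest, _ => if ct ≤ x then some x else pvScanA ct rest (some x)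

def find_last_round_trip (trips : Int) (a2b : List Int) (b2a : List Int) : Int :=
  (List.range trips.toNat).foldl (fun ct _ =>
    let ab := (pvScanA ct a2b none).getD 0
    let ct1 := ab + 100
    let ba := (pvScanA ct1 b2a none).getD 0
    ba + 100) 0

-- ===== PORT B =====
-- next((x for x in xs if x >= ct), xs[-1]); on empty xs Python raises IndexError
-- (excluded by Pre_), the port uses getLastD 0 there.
def pvStepB (a2b : List Int) (b2a : List Int) (ct : Int) : Int :=
  let ab := (a2b.find? (fun x => decide (ct ≤ x))).getD (a2b.getLastD 0)
  let ct1 := ab + 100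
  let ba := (b2a.find? (fun x => decide (ct1 ≤ x))).getD (b2a.getLastD 0)
  ba + 100

-- the `while t < trips` loop of Source B, fuel = number of remaining iterations
def pvLoopB (step : Int → Int) (trips : Int) : PySem.Dict Int Int → Int → Int → Nat → Int
  | _, _, ct, 0 => ct
  | seen, t, ct, fuel + 1 =>
    match seen.get? ct with
    | some s =>
      let cycle := t - s
      let rem := PySem.Int.mod (trips - t) cycle
      (List.range rem.toNat).foldl (fun c _ => step c) ct
    | none => pvLoopB step trips (seen.insert ct t) (t + 1) (step ct) fuel

def find_last_round_trip_alt (trips : Int) (a2b : List Int) (b2a : List Int) : Int :=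
  pvLoopB (pvStepB a2b b2a) trips PySem.Dict.empty 0 0 trips.toNat

-- ===== PRECONDITION & SPEC =====
-- Pre_ excludes only inputs where A raises: with trips ≥ 1 and an empty leg list
-- the loop variable is never assigned and A raises NameError (B raises IndexError).
def Pre_find_last_round_trip (trips : Int) (a2b : List Int) (b2a : List Int) : Prop :=
  trips ≤ 0 ∨ (a2b ≠ [] ∧ b2a ≠ [])
instance (trips : Int) (a2b : List Int) (b2a : List Int) : Decidable (Pre_find_last_round_trip trips a2b b2a) := by unfold Pre_find_last_round_trip; infer_instance

def pvWitness_find_last_round_trip : Int × List Int × List Int := (3, [0, 150], [120, 300])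

def Spec_find_last_round_trip (trips : Int) (a2b : List Int) (b2a : List Int) (out : Int) : Prop := out = find_last_round_trip_alt trips a2b b2a
instance (trips : Int) (a2b : List Int) (b2a : List Int) (out : Int) : Decidable (Spec_find_last_round_trip trips a2b b2a out) := by unfold Spec_find_last_round_trip; infer_instance

-- ===== CLAIM (what is proved, stated in full; the proofs are below) =====
def Claim_equal_find_last_round_trip : Prop := ∀ (trips : Int) (a2b : List Int) (b2a : List Int), Dom_find_last_round_trip trips a2b b2a → Pre_find_last_round_trip trips a2b b2a → Spec_find_last_round_trip trips a2b b2a (find_last_round_trip trips a2b b2a)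

-- ===== LEMMAS AND PROOFS =====

-- n-fold application of step (the common reference both ports are reduced to)
def pvIter (f : Int → Int) : Nat → Int → Int
  | 0, x => x
  | n + 1, x => pvIter f n (f x)

theorem pvIter_succ' (f : Int → Int) (n : Nat) (x : Int) :
    pvIter f (n + 1) x = f (pvIter f n x) := by
  induction n generalizing x with
  | zero => rfl
  | succ n ih => rw [pvIter, ih, pvIter]

theorem pvIter_shift (f : Int → Int) (m : Nat) (y : Int) :
    f (pvIter f m y) = pvIter f m (f y) :=
  (pvIter_succ' f m y).symm

theorem pvIter_add (f : Int → Int) (m n : Nat) (x : Int) :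
    pvIter f (m + n) x = pvIter f m (pvIter f n x) := by
  induction n generalizing x with
  | zero => rfl
  | succ n ih =>
    calc pvIter f (m + (n + 1)) x = f (pvIter f (m + n) x) := pvIter_succ' f (m + n) x
    _ = f (pvIter f m (pvIter f n x)) := by rw [ih]
    _ = pvIter f m (f (pvIter f n x)) := pvIter_shift f m _
    _ = pvIter f m (pvIter f (n + 1) x) := by rw [pvIter_succ' f n x]

theorem foldl_range_eq_pvIter (f : Int → Int) (n : Nat) (x : Int) :
    (List.range n).foldl (fun c _ => f c) x = pvIter f n x := by
  induction n generalizing x with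
  | zero => rfl
  | succ n ih => rw [List.range_succ, List.foldl_append, ih, pvIter_succ']; rfl

-- the leftover-variable scan equals find?-with-last-default on nonempty lists
theorem pvScanA_eq_find (ct : Int) (xs : List Int) (hxs : xs ≠ []) (cur : Option Int) :
    (pvScanA ct xs cur).getD 0
      = (xs.find? (fun x => decide (ct ≤ x))).getD (xs.getLastD 0) := by
  induction xs generalizing cur with
  | nil => exact absurd rfl hxs
  | cons x rest ih =>
    rw [pvScanA, List.find?]
    by_cases h : ct ≤ x
    · simp [h]
    · simp only [h, if_false, decide_false]
      cases rest with
      | nil => simp [pvScanA]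
      | cons y ys =>
        rw [ih (by simp)]
        simp

-- A is the trips-fold iteration of the step function
theorem portA_eq_iter (trips : Int) (a2b b2a : List Int)
    (ha : a2b ≠ []) (hb : b2a ≠ []) :
    find_last_round_trip trips a2b b2a = pvIter (pvStepB a2b b2a) trips.toNat 0 := by
  rw [find_last_round_trip]
  have hbody : (fun (ct : Int) (_ : Nat) =>
      let ab := (pvScanA ct a2b none).getD 0
      let ct1 := ab + 100
      let ba := (pvScanA ct1 b2a none).getD 0
      ba + 100) = fun ct _ => pvStepB a2b b2a ct := by
    funext ct i
    simp only [pvStepB, pvScanA_eq_find _ _ ha, pvScanA_eq_find _ _ hb]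
  rw [hbody, foldl_range_eq_pvIter]

-- periodicity: a cycle of length c lets us reduce the iteration count mod c
theorem pvIter_mul_cycle (f : Int → Int) (c q : Nat) (x : Int) (hc : pvIter f c x = x) :
    pvIter f (q * c) x = x := by
  induction q with
  | zero => rw [Nat.zero_mul]; rfl
  | succ q ih => rw [Nat.succ_mul, pvIter_add, hc, ih]

theorem pvIter_mod_cycle (f : Int → Int) (c n : Nat) (x : Int)
    (hc : pvIter f c x = x) :
    pvIter f (n % c) x = pvIter f n x := by
  conv_rhs => rw [← Nat.mod_add_div n c]
  rw [pvIter_add, Nat.mul_comm, pvIter_mul_cycle f c (n / c) x hc]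

-- loop invariant: every entry (k, v) of seen satisfies step^(t-v) k = ct, 0 ≤ v < t
theorem pvLoopB_eq_iter (step : Int → Int) (trips : Int) :
    ∀ (fuel : Nat) (seen : PySem.Dict Int Int) (t ct : Int),
      0 ≤ t →
      fuel = (trips - t).toNat →
      (∀ p ∈ seen.items, 0 ≤ p.2 ∧ p.2 < t ∧ pvIter step (t - p.2).toNat p.1 = ct) →
      pvLoopB step trips seen t ct fuel = pvIter step fuel ct := by
  intro fuel
  induction fuel with
  | zero => intro seen t ct _ _ _; rfl
  | succ fuel ih =>
    intro seen t ct ht hfuel hinv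
    rw [pvLoopB]
    cases hget : seen.get? ct with
    | some s =>
      simp only
      obtain ⟨hs0, hst, hcyc⟩ := hinv (ct, s) (PySem.Dict.mem_items_of_get?_eq_some seen hget)
      have hmod : (PySem.Int.mod (trips - t) (t - s)).toNat = (fuel + 1) % (t - s).toNat := by
        rw [PySem.Int.mod_eq_emod_of_pos (show (0:Int) < t - s by omega),
            show trips - t = ((fuel + 1 : Nat) : Int) by omega,
            show t - s = (((t - s).toNat : Nat) : Int) by omega,
            ← Int.natCast_mod, Int.toNat_natCast, Int.toNat_natCast]
      rw [foldl_range_eq_pvIter, hmod]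
      exact pvIter_mod_cycle step (t - s).toNat (fuel + 1) ct hcyc
    | none =>
      simp only
      have hinv' : ∀ p ∈ (seen.insert ct t).items,
          0 ≤ p.2 ∧ p.2 < t + 1 ∧ pvIter step (t + 1 - p.2).toNat p.1 = step ct := by
        intro p hp
        rcases (PySem.Dict.mem_items_insert seen ct t p).mp hp with hnew | ⟨hold, _⟩
        · subst hnew
          refine ⟨ht, by omega, ?_⟩
          rw [show (t + 1 - t).toNat = 1 by omega]; rfl
        · obtain ⟨h0, hlt, hit⟩ := hinv p hold
          refine ⟨h0, by omega, ?_⟩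
          rw [show (t + 1 - p.2).toNat = (t - p.2).toNat + 1 by omega, pvIter_succ', hit]
      rw [ih (seen.insert ct t) (t + 1) (step ct) (by omega) (by omega) hinv']
      rfl

-- ===== VERDICT (by name: the statement is the Claim_ definition above) =====
theorem find_last_round_trip_spec : Claim_equal_find_last_round_trip := by
  intro trips a2b b2a _ hpre
  unfold Spec_find_last_round_trip
  rw [find_last_round_trip_alt,
      pvLoopB_eq_iter _ trips trips.toNat PySem.Dict.empty 0 0 le_rfl (by omega)
        (by simp [PySem.Dict.empty])]
  rcases hpre with htr | ⟨ha, hb⟩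
  · simp [find_last_round_trip, show trips.toNat = 0 by omega, pvIter]
  · exact portA_eq_iter trips a2b b2a ha hb
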